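-- pv_equiv track=rewrite | github.com/yourim08/coding-test | 프로그래머스/0/181837. 커피 심부름/커피 심부름.py | solution
-- ===== SOURCE A (Python) =====
-- def solution(order):
--     answer = 0
--     for i in order :
--         if i.find("latte") != -1:
--             answer += 5000
--         else :
--             answer += 4500
--
--     return answer
-- ===== SOURCE B (Python) =====
-- def solution(order):
--     n = len(order)
--     if n == 0:
--         return 0
--     if n == 1:
--         return 5000 if 'latte' in order[0] else 4500
--     mid = n // 2
--     return solution(order[:mid]) + solution(order[mid:])
-- ===== Notes on version B (the rewrite author's own statement) =====
-- stated objective: alternative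
-- what changed: Replaces A's single left-to-right accumulator loop with a divide-and-conquer recursion: split the list in half, solve each half recursively, and add the two subtotals (single-element base case).
import Mathlib
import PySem

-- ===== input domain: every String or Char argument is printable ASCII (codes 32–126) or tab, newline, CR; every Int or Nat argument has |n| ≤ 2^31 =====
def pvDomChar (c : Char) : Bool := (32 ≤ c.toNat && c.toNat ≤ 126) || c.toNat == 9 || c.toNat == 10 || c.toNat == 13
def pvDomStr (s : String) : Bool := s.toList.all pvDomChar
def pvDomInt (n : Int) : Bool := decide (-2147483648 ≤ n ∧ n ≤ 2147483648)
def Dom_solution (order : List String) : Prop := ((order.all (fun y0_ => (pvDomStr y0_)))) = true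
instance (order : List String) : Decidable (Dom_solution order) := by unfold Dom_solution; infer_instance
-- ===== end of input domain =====

-- B replaces A's accumulator loop by a divide-and-conquer recursion (split in half, add the subtotals); alternative structure, same cost.
-- ===== PORT A =====
def solution (order : List String) : Int :=
  order.foldl (fun answer i =>
    if PySem.Str.find i "latte" ≠ -1 then answer + 5000 else answer + 4500) 0

-- ===== PORT B =====
def solution_alt : List String → Int
  | [] => 0
  | [i] => if PySem.Str.isIn "latte" i then 5000 else 4500
  | i :: j :: rest =>
    let order := i :: j :: rest
    let mid := order.length / 2
    solution_alt (order.take mid) + solution_alt (order.drop mid)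
termination_by l => l.length
decreasing_by
  · simp only [List.length_take, List.length_cons]; omega
  · simp only [List.length_drop, List.length_cons]; omega

-- ===== PRECONDITION & SPEC =====
def Spec_solution (order : List String) (out : Int) : Prop := out = solution_alt order
instance (order : List String) (out : Int) : Decidable (Spec_solution order out) := by unfold Spec_solution; infer_instance

-- ===== CLAIM (what is proved, stated in full; the proofs are below) =====
def Claim_equal_solution : Prop := ∀ (order : List String), Dom_solution order → Spec_solution order (solution order)

-- ===== LEMMAS AND PROOFS =====

theorem solution_foldl_shift (order : List String) (a : Int) :
    order.foldl (fun answer i =>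
      if PySem.Str.find i "latte" ≠ -1 then answer + 5000 else answer + 4500) a
    = a + solution order := by
  induction order generalizing a with
  | nil => simp [solution]
  | cons x xs ih =>
    simp only [solution, List.foldl_cons]
    rw [ih, ih]
    split_ifs <;> ring

theorem solution_append (l r : List String) :
    solution (l ++ r) = solution l + solution r := by
  simp only [solution, List.foldl_append]
  rw [solution_foldl_shift]
  rfl

theorem solution_single (i : String) :
    solution [i] = if PySem.Str.isIn "latte" i then 5000 else 4500 := by
  have hfind : (PySem.Str.find i "latte" ≠ -1) ↔ PySem.Str.isIn "latte" i = true := by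
    rw [PySem.Str.find_ne_neg_one_iff, PySem.Str.isIn_iff_infix]
  simp only [solution, List.foldl_cons, List.foldl_nil, zero_add]
  by_cases h : PySem.Str.isIn "latte" i = true
  · rw [if_pos (hfind.mpr h), if_pos h]
  · rw [if_neg (fun hc => h (hfind.mp hc)), if_neg h]

theorem solution_alt_eq (order : List String) : solution_alt order = solution order := by
  match order with
  | [] => simp [solution_alt, solution]
  | [i] => rw [solution_alt, solution_single]
  | i :: j :: rest =>
    rw [solution_alt]
    have h1 := solution_alt_eq ((i :: j :: rest).take ((i :: j :: rest).length / 2))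
    have h2 := solution_alt_eq ((i :: j :: rest).drop ((i :: j :: rest).length / 2))
    rw [h1, h2, ← solution_append, List.take_append_drop]
termination_by order.length
decreasing_by
  · simp only [List.length_take, List.length_cons]; omega
  · simp only [List.length_drop, List.length_cons]; omega

-- ===== VERDICT (by name: the statement is the Claim_ definition above) =====
theorem solution_spec : Claim_equal_solution := by
  intro order _
  exact (solution_alt_eq order).symm
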